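-- pv_equiv track=rewrite | github.com/innogames/igmonplugins | src/lbpool_nodes.py | get_nodes_output
-- ===== SOURCE A (Python) =====
-- def get_nodes_output(nodes):
--     output = ''
--
--     nodes_up = [k for k, v in nodes if v['state'] == 'up']
--     nodes_down = [k for k, v in nodes if v['state'] == 'down']
--
--     if nodes_up:
--         output += '\n\tNodes up:\n\t\t'
--         output += '\n\t\t'.join(nodes_up)
--
--     if nodes_down:
--         output += '\n\tNodes down:\n\t\t'
--         output += '\n\t\t'.join(nodes_down)
--
--     return output
-- ===== SOURCE B (Python) =====
-- def get_nodes_output(nodes):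
--     up_txt = None
--     down_txt = None
--     for k, v in nodes:
--         state = v['state']
--         if state == 'up':
--             up_txt = k if up_txt is None else up_txt + '\n\t\t' + k
--         elif state == 'down':
--             down_txt = k if down_txt is None else down_txt + '\n\t\t' + k
--
--     output = ''
--     if up_txt is not None:
--         output += '\n\tNodes up:\n\t\t' + up_txt
--     if down_txt is not None:
--         output += '\n\tNodes down:\n\t\t' + down_txt
--     return output
-- ===== Notes on version B (the rewrite author's own statement) =====
-- stated objective: alternative
-- what changed: Instead of A's two filtering comprehensions followed by '\n\t\t'.join, B makes one pass that grows each section's already-joined text directly in two Option-like string accumulators, so no intermediate name lists and no join call exist.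
import Mathlib
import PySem

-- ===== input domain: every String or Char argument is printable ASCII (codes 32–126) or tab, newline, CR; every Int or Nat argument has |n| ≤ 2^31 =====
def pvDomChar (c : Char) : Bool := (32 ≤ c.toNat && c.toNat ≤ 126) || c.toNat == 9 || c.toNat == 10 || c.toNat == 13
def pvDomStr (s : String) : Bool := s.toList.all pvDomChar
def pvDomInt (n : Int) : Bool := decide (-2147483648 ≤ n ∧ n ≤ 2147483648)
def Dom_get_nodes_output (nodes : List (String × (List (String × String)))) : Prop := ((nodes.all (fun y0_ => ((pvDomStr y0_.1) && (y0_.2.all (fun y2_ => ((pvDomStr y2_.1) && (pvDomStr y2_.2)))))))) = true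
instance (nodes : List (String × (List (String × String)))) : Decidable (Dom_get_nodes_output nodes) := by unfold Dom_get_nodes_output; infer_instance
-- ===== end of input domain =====

-- B replaces A's list-comprehension-then-join structure by one pass that grows each
-- section's joined text directly in two Option-string accumulators (objective: simpler).

-- ===== PORT A =====
-- v['state'] is ported as Dict lookup with default "" — exact under Pre_ (every dict has a 'state' key).
def get_nodes_output (nodes : List (String × (List (String × String)))) : String :=
  let output : String := ""
  let nodes_up := (nodes.filter (fun kv => (PySem.Dict.mk kv.2).getD "state" "" == "up")).map (·.1)
  let nodes_down := (nodes.filter (fun kv => (PySem.Dict.mk kv.2).getD "state" "" == "down")).map (·.1)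
  let output := if nodes_up.isEmpty then output
    else output ++ "\n\tNodes up:\n\t\t" ++ PySem.Str.join "\n\t\t" nodes_up
  let output := if nodes_down.isEmpty then output
    else output ++ "\n\tNodes down:\n\t\t" ++ PySem.Str.join "\n\t\t" nodes_down
  output

-- ===== PORT B =====
def get_nodes_output_alt (nodes : List (String × (List (String × String)))) : String :=
  let acc := nodes.foldl (fun (acc : Option String × Option String) kv =>
      let state := (PySem.Dict.mk kv.2).getD "state" ""
      if state == "up" then
        (some (match acc.1 with | none => kv.1 | some s => s ++ "\n\t\t" ++ kv.1), acc.2)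
      else if state == "down" then
        (acc.1, some (match acc.2 with | none => kv.1 | some s => s ++ "\n\t\t" ++ kv.1))
      else acc) (none, none)
  let output : String := ""
  let output := match acc.1 with | none => output | some s => output ++ ("\n\tNodes up:\n\t\t" ++ s)
  let output := match acc.2 with | none => output | some s => output ++ ("\n\tNodes down:\n\t\t" ++ s)
  output

-- ===== PRECONDITION & SPEC =====
-- Pre_ excludes exactly the inputs where some node's dict lacks a 'state' key: A raises KeyError there (and so does B).
def Pre_get_nodes_output (nodes : List (String × (List (String × String)))) : Prop :=
  ∀ p ∈ nodes, "state" ∈ p.2.map Prod.fst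
instance (nodes : List (String × (List (String × String)))) : Decidable (Pre_get_nodes_output nodes) := by unfold Pre_get_nodes_output; infer_instance
def pvWitness_get_nodes_output : (List (String × (List (String × String)))) :=
  [("web01", [("state", "up")]), ("web02", [("state", "down")])]
def Spec_get_nodes_output (nodes : List (String × (List (String × String)))) (out : String) : Prop := out = get_nodes_output_alt nodes
instance (nodes : List (String × (List (String × String)))) (out : String) : Decidable (Spec_get_nodes_output nodes out) := by unfold Spec_get_nodes_output; infer_instance

-- ===== CLAIM =====
def Claim_equal_get_nodes_output : Prop := ∀ (nodes : List (String × (List (String × String)))), Dom_get_nodes_output nodes → Pre_get_nodes_output nodes → Spec_get_nodes_output nodes (get_nodes_output nodes)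

-- ===== LEMMAS AND PROOFS =====

-- the per-category string accumulator B maintains, isolated for the invariant
def pvExt (o : Option String) (l : List String) : Option String :=
  l.foldl (fun o k => some (match o with | none => k | some s => s ++ "\n\t\t" ++ k)) o

theorem pv_fold_split (nodes : List (String × (List (String × String))))
    (ou od : Option String) :
    nodes.foldl (fun (acc : Option String × Option String) kv =>
      let state := (PySem.Dict.mk kv.2).getD "state" ""
      if state == "up" then
        (some (match acc.1 with | none => kv.1 | some s => s ++ "\n\t\t" ++ kv.1), acc.2)
      else if state == "down" then
        (acc.1, some (match acc.2 with | none => kv.1 | some s => s ++ "\n\t\t" ++ kv.1))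
      else acc) (ou, od)
    = (pvExt ou ((nodes.filter (fun kv => (PySem.Dict.mk kv.2).getD "state" "" == "up")).map (·.1)),
       pvExt od ((nodes.filter (fun kv => (PySem.Dict.mk kv.2).getD "state" "" == "down")).map (·.1))) := by
  induction nodes generalizing ou od with
  | nil => simp [pvExt]
  | cons kv rest ih =>
    simp only [List.foldl_cons, List.filter_cons]
    by_cases hu : (PySem.Dict.mk kv.2).getD "state" "" == "up"
    · have hd : ((PySem.Dict.mk kv.2).getD "state" "" == "down") = false := by simp_all
      simp only [hu, hd, if_true, Bool.false_eq_true, if_false]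
      rw [ih]; simp [pvExt]
    · by_cases hd : (PySem.Dict.mk kv.2).getD "state" "" == "down"
      · simp only [hu, hd, Bool.false_eq_true, if_false, if_true]
        rw [ih]; simp [pvExt]
      · simp only [hu, hd, Bool.false_eq_true, if_false]
        exact ih ou od

theorem pvExt_some (l : List String) (s : String) :
    pvExt (some s) l = some (PySem.Str.join "\n\t\t" (s :: l)) := by
  induction l generalizing s with
  | nil => simp [pvExt, PySem.Str.join]
  | cons k rest ih =>
    show pvExt (some (s ++ "\n\t\t" ++ k)) rest = _
    rw [ih]
    congr 1
    cases rest with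
    | nil => simp [PySem.Str.join, PySem.Chars.join_cons_cons, PySem.Chars.join_singleton]
    | cons b r => simp [PySem.Str.join, PySem.Chars.join_cons_cons, List.append_assoc]

theorem pvExt_none (l : List String) :
    pvExt (none : Option String) l
      = if l.isEmpty then none else some (PySem.Str.join "\n\t\t" l) := by
  cases l with
  | nil => simp [pvExt]
  | cons k rest =>
    show pvExt (some k) rest = _
    rw [pvExt_some]; simp

-- ===== VERDICT =====
theorem get_nodes_output_spec : Claim_equal_get_nodes_output := by
  intro nodes _ _
  unfold Spec_get_nodes_output get_nodes_output get_nodes_output_alt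
  rw [pv_fold_split, pvExt_none, pvExt_none]
  cases hup : ((nodes.filter (fun kv => (PySem.Dict.mk kv.2).getD "state" "" == "up")).map (·.1)).isEmpty <;>
  cases hdn : ((nodes.filter (fun kv => (PySem.Dict.mk kv.2).getD "state" "" == "down")).map (·.1)).isEmpty <;>
    simp [hup, hdn, String.append_assoc]
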